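-- pv_equiv track=rewrite | github.com/gasobral/python_codes | Approximation Algorithms/graham_scheduling_algorithm.py | min_machine
-- ===== SOURCE A (Python) =====
-- def min_machine(M) -> int:
--     """
-- Given M machines, retuns the index of the machine which has the mininum
-- amount of workload
--     """
--
--     k = 0
--     sum_task = sum(M[0])
--
--     for i in range(1, len(M)):
--         if sum(M[i]) < sum_task:
--             sum_task = sum(M[i])
--             k = i
--
--     return k
-- ===== SOURCE B (Python) =====
-- def min_machine(M) -> int:
--     def best(lo, hi):
--         # earliest index of minimum total workload among machines lo..hi-1
--         if hi - lo <= 1: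
--             return lo
--         mid = (lo + hi) // 2
--         l = best(lo, mid)
--         r = best(mid, hi)
--         return l if sum(M[l]) <= sum(M[r]) else r
--     return best(0, len(M))
-- ===== Notes on version B (the rewrite author's own statement) =====
-- stated objective: alternative
-- what changed: B replaces A's left-to-right running-minimum loop by a divide-and-conquer recursion over index halves, combining the two half-winners with a <= comparison so the earliest index wins ties (matching A's first-minimum rule).
-- outside the precondition, e.g. on min_machine([]): A raises IndexError, B returns 0
import Mathlib
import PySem

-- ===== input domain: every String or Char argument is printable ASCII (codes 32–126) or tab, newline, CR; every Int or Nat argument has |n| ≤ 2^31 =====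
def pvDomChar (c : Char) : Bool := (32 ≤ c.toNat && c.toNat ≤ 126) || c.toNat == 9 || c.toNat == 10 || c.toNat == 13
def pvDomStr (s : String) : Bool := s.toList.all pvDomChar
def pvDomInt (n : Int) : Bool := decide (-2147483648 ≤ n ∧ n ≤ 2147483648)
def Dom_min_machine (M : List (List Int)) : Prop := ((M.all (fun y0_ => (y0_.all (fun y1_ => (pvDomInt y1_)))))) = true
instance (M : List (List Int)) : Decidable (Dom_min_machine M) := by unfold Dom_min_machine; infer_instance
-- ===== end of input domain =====

-- B recomputes the argmin by a divide-and-conquer recursion on index halves (earliest index wins ties); equal to A on nonempty M (A raises IndexError on []).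


-- ===== PORT A =====
def min_machine (M : List (List Int)) : Int :=
  let sum_task := (PySem.List.pyGetD M 0 []).foldl (· + ·) 0
  let st := (PySem.List.pyRange 1 (M.length : Int) 1).foldl
    (fun (acc : Int × Int) i =>
      if (PySem.List.pyGetD M i []).foldl (· + ·) 0 < acc.2 then
        (i, (PySem.List.pyGetD M i []).foldl (· + ·) 0)
      else acc)
    ((0 : Int), sum_task)
  st.1

-- ===== PORT B =====
-- Source B's inner helper best(lo, hi): divide-and-conquer over the index range [lo, hi).
-- fuel = range size bounds the recursion depth; it is a totality guard only (never reached while lo < hi).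
def bestDC (M : List (List Int)) (fuel : Nat) (lo hi : Int) : Int :=
  match fuel with
  | 0 => lo
  | fuel + 1 =>
    if hi - lo ≤ 1 then lo
    else
      let mid := PySem.Int.floordiv (lo + hi) 2
      let l := bestDC M fuel lo mid
      let r := bestDC M fuel mid hi
      if (PySem.List.pyGetD M l []).foldl (· + ·) 0 ≤ (PySem.List.pyGetD M r []).foldl (· + ·) 0
      then l else r

def min_machine_alt (M : List (List Int)) : Int :=
  bestDC M M.length 0 (M.length : Int)

-- ===== PRECONDITION & SPEC =====
-- A evaluates M[0]: on M = [] it raises IndexError; excluded.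
def Pre_min_machine (M : List (List Int)) : Prop := M ≠ []
instance (M : List (List Int)) : Decidable (Pre_min_machine M) := by unfold Pre_min_machine; infer_instance
def pvWitness_min_machine : List (List Int) := [[1, 2], [3]]

def Spec_min_machine (M : List (List Int)) (out : Int) : Prop := out = min_machine_alt M
instance (M : List (List Int)) (out : Int) : Decidable (Spec_min_machine M out) := by unfold Spec_min_machine; infer_instance

-- ===== CLAIM (what is proved, stated in full; the proofs are below) =====
def Claim_equal_min_machine : Prop := ∀ (M : List (List Int)), Dom_min_machine M → Pre_min_machine M → Spec_min_machine M (min_machine M)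

-- ===== LEMMAS AND PROOFS =====

-- total workload of machine j (Nat index)
def rowSum (M : List (List Int)) (j : Nat) : Int := (M.getD j []).foldl (· + ·) 0

-- bestDC returns the FIRST index of minimal row sum in [lo, hi)
lemma bestDC_invariant (M : List (List Int)) :
    ∀ (fuel : Nat) (lo hi : Int), (hi - lo).toNat ≤ fuel → 0 ≤ lo → lo < hi →
    ∃ k : Nat, bestDC M fuel lo hi = (k : Int) ∧ lo ≤ (k : Int) ∧ (k : Int) < hi ∧
      (∀ j : Nat, lo ≤ (j : Int) → (j : Int) < hi → rowSum M k ≤ rowSum M j) ∧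
      (∀ j : Nat, lo ≤ (j : Int) → j < k → rowSum M k < rowSum M j) := by
  intro fuel
  induction fuel with
  | zero => intro lo hi hn h0 hlt; omega
  | succ n ih =>
    intro lo hi hn h0 hlt
    rw [bestDC]
    by_cases hbase : hi - lo ≤ 1
    · refine ⟨lo.toNat, ?_, by omega, by omega, ?_, ?_⟩
      · simp [hbase, Int.toNat_of_nonneg h0]
      · intro j hj1 hj2
        have : j = lo.toNat := by omega
        subst this; exact le_refl _
      · intro j hj1 hj2; omega
    · simp only [hbase, if_false]
      have hmid : PySem.Int.floordiv (lo + hi) 2 = (lo + hi) / 2 :=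
        PySem.Int.floordiv_eq_ediv_of_pos (by omega)
      rw [hmid]
      have hb1 : lo < (lo + hi) / 2 := by omega
      have hb2 : (lo + hi) / 2 < hi := by omega
      obtain ⟨kl, hl, hl1, hl2, hlmin, hlfirst⟩ :=
        ih lo ((lo + hi) / 2) (by omega) h0 hb1
      obtain ⟨kr, hr, hr1, hr2, hrmin, hrfirst⟩ :=
        ih ((lo + hi) / 2) hi (by omega) (by omega) hb2
      rw [hl, hr]
      have hgl : (PySem.List.pyGetD M (kl : Int) []).foldl (· + ·) 0 = rowSum M kl := by
        rw [PySem.List.pyGetD_natCast]; rfl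
      have hgr : (PySem.List.pyGetD M (kr : Int) []).foldl (· + ·) 0 = rowSum M kr := by
        rw [PySem.List.pyGetD_natCast]; rfl
      rw [hgl, hgr]
      by_cases hc : rowSum M kl ≤ rowSum M kr
      · refine ⟨kl, by simp [hc], by omega, by omega, ?_, ?_⟩
        · intro j hj1 hj2
          by_cases hjl : (j : Int) < (lo + hi) / 2
          · exact hlmin j hj1 hjl
          · exact le_trans hc (hrmin j (by omega) hj2)
        · intro j hj1 hj2; exact hlfirst j hj1 hj2
      · push Not at hc
        refine ⟨kr, by simp [not_le.mpr hc], by omega, by omega, ?_, ?_⟩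
        · intro j hj1 hj2
          by_cases hjl : (j : Int) < (lo + hi) / 2
          · exact le_trans (le_of_lt hc) (hlmin j hj1 hjl)
          · exact hrmin j (by omega) hj2
        · intro j hj1 hj2
          by_cases hjl : (j : Int) < (lo + hi) / 2
          · exact lt_of_lt_of_le hc (hlmin j hj1 hjl)
          · exact hrfirst j (by omega) hj2

-- A's loop, abstracted to the list of per-machine sums.
def runA (s : List Int) : Int × Int :=
  (PySem.List.pyRange 1 (s.length : Int) 1).foldl
    (fun (acc : Int × Int) i =>
      if PySem.List.pyGetD s i 0 < acc.2 then (i, PySem.List.pyGetD s i 0) else acc)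
    ((0 : Int), s.headD 0)

lemma runA_invariant (s : List Int) (hs : s ≠ []) :
    ∃ (k : Nat) (m : Int), runA s = ((k : Int), m) ∧
      PySem.List.index? s m = some k ∧ ∀ y ∈ s, m ≤ y := by
  induction s using List.reverseRecOn with
  | nil => exact absurd rfl hs
  | append_singleton u y ih =>
    rcases eq_or_ne u [] with rfl | hu
    · refine ⟨0, y, ?_, ?_, ?_⟩
      · simp [runA, PySem.List.pyRange_one_eq_nil]
      · simp
      · simp
    · obtain ⟨k, m, hrun, hidx, hmin⟩ := ih hu
      have hm : m ∈ u := (PySem.List.index?_isSome_iff u m).mp (by rw [hidx]; rfl)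
      have hlen : (1 : Int) ≤ (u.length : Int) := by
        have := List.length_pos_iff.mpr hu; omega
      have hsplit : PySem.List.pyRange 1 ((u ++ [y]).length : Int) 1
          = PySem.List.pyRange 1 (u.length : Int) 1 ++ [(u.length : Int)] := by
        rw [List.length_append, List.length_cons, List.length_nil]
        push_cast
        exact PySem.List.pyRange_one_succ_right hlen
      have hget : ∀ i ∈ PySem.List.pyRange 1 (u.length : Int) 1,
          PySem.List.pyGetD (u ++ [y]) i 0 = PySem.List.pyGetD u i 0 := by
        intro i hi
        rw [PySem.List.mem_pyRange_one] at hi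
        obtain ⟨h1, h2⟩ := hi
        rw [PySem.List.pyGetD_of_nonneg _ _ (by omega), PySem.List.pyGetD_of_nonneg _ _ (by omega)]
        have hlt : i.toNat < u.length := by omega
        simp [List.getD, List.getElem?_append_left hlt]
      have hhead : (u ++ [y]).headD 0 = u.headD 0 := by
        rcases u with _ | ⟨a, t⟩
        · exact absurd rfl hu
        · simp
      have hfold : runA (u ++ [y]) =
          (fun (acc : Int × Int) i =>
            if PySem.List.pyGetD (u ++ [y]) i 0 < acc.2 then (i, PySem.List.pyGetD (u ++ [y]) i 0) else acc)
            (runA u) (u.length : Int) := by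
        have hinner :
            (PySem.List.pyRange 1 (u.length : Int) 1).foldl
              (fun (acc : Int × Int) i =>
                if PySem.List.pyGetD (u ++ [y]) i 0 < acc.2 then (i, PySem.List.pyGetD (u ++ [y]) i 0) else acc)
              ((0 : Int), u.headD 0) = runA u := by
          unfold runA
          exact PySem.List.foldl_congr_mem _ _ _ _ (by intro acc x hx; rw [hget x hx])
        unfold runA
        rw [hsplit, List.foldl_append, hhead]
        rw [show (PySem.List.pyRange 1 (u.length : Int) 1).foldl
              (fun (acc : Int × Int) i =>
                if PySem.List.pyGetD (u ++ [y]) i 0 < acc.2 then (i, PySem.List.pyGetD (u ++ [y]) i 0) else acc)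
              ((0 : Int), u.headD 0) = runA u from hinner]
        simp only [List.foldl_cons, List.foldl_nil]
        unfold runA
        rfl
      have hgy : PySem.List.pyGetD (u ++ [y]) (u.length : Int) 0 = y := by
        rw [PySem.List.pyGetD_of_nonneg _ _ (by positivity)]
        simp [List.getD]
      by_cases hlt : y < m
      · refine ⟨u.length, y, ?_, ?_, ?_⟩
        · rw [hfold, hrun]; simp [hgy, hlt]
        · have hyn : y ∉ u := fun hmem => absurd (hmin y hmem) (by omega)
          exact PySem.List.index?_append_singleton_self u y hyn
        · intro z hz
          rcases List.mem_append.mp hz with hz | hz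
          · exact le_of_lt (lt_of_lt_of_le hlt (hmin z hz))
          · simp at hz; omega
      · refine ⟨k, m, ?_, ?_, ?_⟩
        · rw [hfold, hrun]; simp [hgy, hlt]
        · rw [PySem.List.index?_append_of_mem _ hm, hidx]
        · intro z hz
          rcases List.mem_append.mp hz with hz | hz
          · exact hmin z hz
          · simp at hz; omega

lemma min_machine_eq_runA (M : List (List Int)) :
    min_machine M = (runA (M.map (fun m => m.foldl (· + ·) 0))).1 := by
  have hkey : ∀ i : Int,
      PySem.List.pyGetD (M.map (fun m => m.foldl (· + ·) 0)) i 0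
        = (PySem.List.pyGetD M i []).foldl (· + ·) 0 := by
    intro i
    have := PySem.List.pyGetD_map (fun (m : List Int) => m.foldl (· + ·) 0) M i []
    simpa using this
  have hhead : (M.map (fun m => m.foldl (· + ·) 0)).headD 0
      = (PySem.List.pyGetD M 0 []).foldl (· + ·) 0 := by
    rcases M with _ | ⟨m0, rest⟩
    · simp [PySem.List.pyGetD, PySem.List.pyGet?, PySem.List.pyIdx?]
    · simp [PySem.List.pyGetD_of_nonneg _ _ (le_refl (0 : Int)), List.getD]
  unfold min_machine runA
  simp only [List.length_map, hkey, hhead]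

-- sums list entries are rowSum
lemma sums_getElem (M : List (List Int)) (j : Nat) (hj : j < M.length) :
    (M.map (fun m => m.foldl (· + ·) 0))[j]'(by simpa using hj) = rowSum M j := by
  simp [rowSum, List.getD_eq_getElem?_getD, List.getElem?_eq_getElem hj]

-- ===== VERDICT (by name: the statement is the Claim_ definition above) =====
theorem min_machine_spec : Claim_equal_min_machine := by
  intro M _ hpre
  unfold Spec_min_machine min_machine_alt
  set s := M.map (fun m => m.foldl (· + ·) 0) with hsdef
  have hne : s ≠ [] := by simpa [hsdef] using hpre
  have hlen : 0 < M.length := List.length_pos_iff.mpr hpre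
  obtain ⟨kA, m, hrun, hidx, hmin⟩ := runA_invariant s hne
  obtain ⟨hkAlt, hkAval, hkAfirst⟩ := PySem.List.getElem_of_index?_eq_some hidx
  obtain ⟨kB, hB, hB1, hB2, hBmin, hBfirst⟩ :=
    bestDC_invariant M M.length 0 (M.length : Int) (by omega) (le_refl 0) (by exact_mod_cast hlen)
  have hslen : s.length = M.length := by simp [hsdef]
  have hkBlt : kB < M.length := by exact_mod_cast hB2
  have hkAltM : kA < M.length := by omega
  -- rowSum at kA equals m
  have hvA : rowSum M kA = m := by rw [← sums_getElem M kA hkAltM]; exact hkAval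
  -- m ≤ rowSum kB (m is min of s) and rowSum kB ≤ rowSum kA
  have h1 : m ≤ rowSum M kB := by
    have : s[kB]'(by omega) ∈ s := List.getElem_mem _
    have := hmin _ this
    rwa [sums_getElem M kB hkBlt] at this
  have h2 : rowSum M kB ≤ rowSum M kA := hBmin kA (by positivity) (by exact_mod_cast hkAltM)
  have heq : rowSum M kB = m := le_antisymm (hvA ▸ h2) h1
  -- the two indices coincide
  have : kA = kB := by
    rcases lt_trichotomy kA kB with h | h | h
    · exact absurd (hvA ▸ hBfirst kA (by positivity) h) (by rw [heq]; omega)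
    · exact h
    · have hne' : s[kB]'(by omega) ≠ m := hkAfirst kB h
      rw [sums_getElem M kB hkBlt] at hne'
      exact absurd heq hne'
  rw [min_machine_eq_runA M, ← hsdef, hrun, hB, this]
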